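-- pv_equiv track=rewrite | github.com/minkue777/Algorithm | Acmicpc/1032.py | solution
-- ===== SOURCE A (Python) =====
-- def solution(num_of_file, file_name):
--     file_length = len(file_name[0])
--     if num_of_file == 1:
--         return file_name[0]
--     ans = ""
--     for j in range(file_length):
--         for i in range(num_of_file-1):
--             if file_name[i][j] != file_name[i + 1][j]:
--                 ans += '?'
--                 break
--             if i == num_of_file-2:
--                 ans += file_name[0][j]
--     return ans
-- ===== SOURCE B (Python) =====
-- def solution(num_of_file, file_name):
--     file_length = len(file_name[0])
--     ans = []
--     for j in range(file_length):
--         chars = {file_name[i][j] for i in range(num_of_file)}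
--         ans.append(file_name[0][j] if len(chars) == 1 else '?')
--     return "".join(ans)
-- ===== Notes on version B (the rewrite author's own statement) =====
-- stated objective: idiomatic
-- what changed: Replaces the pairwise-adjacent scan with early break and the i==num_of_file-2 sentinel append by a per-column set comprehension over all num_of_file files with a single set-size check, joining the characters at the end (the num_of_file==1 early return falls out naturally).
-- outside the precondition, e.g. on solution(0, ['ab']): A returns '', B returns '??'; on solution(3, ['ab', 'cd']): A returns '??', B raises IndexError; on solution(3, ['ab', 'cd', 'x']): A returns '??', B raises IndexError
import Mathlib
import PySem

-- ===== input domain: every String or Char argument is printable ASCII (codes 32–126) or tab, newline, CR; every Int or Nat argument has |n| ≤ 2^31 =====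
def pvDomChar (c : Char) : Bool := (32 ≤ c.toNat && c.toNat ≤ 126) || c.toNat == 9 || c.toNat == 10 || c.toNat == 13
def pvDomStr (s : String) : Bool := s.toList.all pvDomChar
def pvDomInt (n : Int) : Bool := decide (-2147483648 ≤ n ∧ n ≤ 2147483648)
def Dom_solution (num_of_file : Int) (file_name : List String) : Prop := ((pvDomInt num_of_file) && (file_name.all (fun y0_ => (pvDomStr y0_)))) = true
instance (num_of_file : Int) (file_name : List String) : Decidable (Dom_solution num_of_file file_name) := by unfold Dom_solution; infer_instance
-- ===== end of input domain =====

-- B replaces A's pairwise-adjacent column scan (early break + i==num_of_file-2 sentinel append)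
-- by a per-column set of all num_of_file characters and a single set-size check (more idiomatic, same cost).


-- ===== PORT A =====
-- file_name[i][j] (either indexing may raise IndexError = none)
def pvCharAt (file_name : List String) (i j : Int) : Option Char :=
  match PySem.List.pyGet? file_name i with
  | some s => PySem.Str.pyGet? s j
  | none => none

-- A's inner 'for i in range(num_of_file-1)' for one column j, as counting recursion on the number of
-- remaining iterations (Python's range is lazy; the fuel is exactly range(num_of_file-1) from index i);
-- returns what the loop appends to ans: '?' with break on a mismatch, file_name[0][j] at
-- i == num_of_file-2; a none from pvCharAt is Python's IndexError, unreachable under Pre_solution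
def pvInnerA (file_name : List String) (num_of_file : Int) (f0 : String) (j : Int) : Nat → Int → List Char
  | 0, _ => []
  | t + 1, i =>
    match pvCharAt file_name i j, pvCharAt file_name (i + 1) j with
    | some c1, some c2 =>
      if c1 ≠ c2 then ['?']
      else (if i = num_of_file - 2 then (PySem.Str.pyGet? f0 j).elim [] (fun c => [c]) else [])
             ++ pvInnerA file_name num_of_file f0 j t (i + 1)
    | _, _ => []

def solution (num_of_file : Int) (file_name : List String) : String :=
  match file_name with
  | [] => ""   -- file_name[0] raises IndexError; excluded by Pre_solution
  | f0 :: _ =>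
    let file_length := PySem.Str.len f0
    if num_of_file = 1 then f0
    else
      String.ofList ((PySem.List.pyRange 0 file_length).foldl
        (fun ans j => ans ++ pvInnerA file_name num_of_file f0 j (num_of_file - 1).toNat 0) [])

-- ===== PORT B =====
-- one column of B: the set {file_name[i][j] : i in range(num_of_file)} and a size check; the .getD '?'
-- on f0[j] is unreachable (j < len(f0)) and a none element of the set is IndexError, outside Pre_solution
def pvColB (file_name : List String) (num_of_file : Int) (f0 : String) (j : Int) : Char :=
  let chars : PySem.Set (Option Char) :=
    PySem.Set.ofList ((PySem.List.pyRange 0 num_of_file).map (fun i => pvCharAt file_name i j))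
  if chars.len = 1 then (PySem.Str.pyGet? f0 j).getD '?' else '?'

def solution_alt (num_of_file : Int) (file_name : List String) : String :=
  match file_name with
  | [] => ""   -- len(file_name[0]) raises IndexError; excluded by Pre_solution
  | f0 :: _ =>
    String.ofList ((PySem.List.pyRange 0 (PySem.Str.len f0)).map (pvColB file_name num_of_file f0))

-- ===== PRECONDITION & SPEC =====
-- Pre_ excludes: the empty list (A raises IndexError); scans with 1 <= num_of_file where one of the
-- first num_of_file names is missing or shorter than the first (A raises IndexError there, except when
-- every column's adjacent scan happens to break first, an accident of the early break on which B
-- naturally raises); and num_of_file <= 0 with a nonempty first name, an out-of-contract file count on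
-- which A's '' (empty inner range) and B's '?' per column are both defensible and neither is specified.
def Pre_solution (num_of_file : Int) (file_name : List String) : Prop :=
  file_name ≠ [] ∧
  ((file_name.headD "").toList.length = 0 ∨
    (1 ≤ num_of_file ∧ num_of_file ≤ (file_name.length : Int) ∧
     ∀ s ∈ file_name.take num_of_file.toNat, (file_name.headD "").toList.length ≤ s.toList.length))
instance (num_of_file : Int) (file_name : List String) : Decidable (Pre_solution num_of_file file_name) := by unfold Pre_solution; infer_instance

def pvWitness_solution : Int × List String := (2, ["ab", "ac"])

def Spec_solution (num_of_file : Int) (file_name : List String) (out : String) : Prop := out = solution_alt num_of_file file_name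
instance (num_of_file : Int) (file_name : List String) (out : String) : Decidable (Spec_solution num_of_file file_name out) := by unfold Spec_solution; infer_instance

-- ===== CLAIM (what is proved, stated in full; the proofs are below) =====
def Claim_equal_solution : Prop := ∀ (num_of_file : Int) (file_name : List String), Dom_solution num_of_file file_name → Pre_solution num_of_file file_name → Spec_solution num_of_file file_name (solution num_of_file file_name)

-- ===== LEMMAS AND PROOFS =====


lemma pv_set_len_one {α : Type} [BEq α] [LawfulBEq α] (x : α) (xs : List α) :
    (PySem.Set.ofList (x :: xs)).len = 1 ↔ ∀ y ∈ xs, y = x := by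
  have hlen : (PySem.Set.ofList (x :: xs)).len = ((PySem.Set.ofList (x :: xs)).length : Int) := by
    simp [PySem.Set.len]
  have hx : x ∈ PySem.Set.ofList (x :: xs) :=
    (PySem.Set.mem_ofList _ _).2 (List.mem_cons_self)
  constructor
  · intro h y hy
    have h1 : (PySem.Set.ofList (x :: xs)).length = 1 := by omega
    obtain ⟨a, ha⟩ := List.length_eq_one_iff.1 h1
    have hy' : y ∈ PySem.Set.ofList (x :: xs) :=
      (PySem.Set.mem_ofList _ _).2 (List.mem_cons_of_mem _ hy)
    rw [ha] at hx hy'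
    simp at hx hy'
    rw [hx, hy']
  · intro h
    have hall : ∀ y ∈ PySem.Set.ofList (x :: xs), y = x := by
      intro y hy
      rcases (PySem.Set.mem_ofList _ _).1 hy with hy' 
      rcases List.mem_cons.1 hy' with h0 | h0
      · exact h0
      · exact h y h0
    have hnd := PySem.Set.nodup_ofList (x :: xs)
    rcases hs : (PySem.Set.ofList (x :: xs) : List α) with _ | ⟨a, t⟩
    · rw [hs] at hx; simp at hx
    · rw [hs] at hall hnd
      have ha : a = x := hall a List.mem_cons_self
      have ht : t = [] := by
        cases t with
        | nil => rfl
        | cons b u =>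
          have hb : b = x := hall b (by simp)
          rw [List.nodup_cons] at hnd
          exact absurd (by simp [ha, hb]) hnd.1
      rw [ht]
      simp [PySem.Set.len]

lemma pv_chain (ch : Int → Option Char) (n : Int) :
    (∀ i : Int, 0 ≤ i → i < n - 1 → ch i = ch (i + 1)) ↔
    (∀ i : Int, 0 ≤ i → i < n → ch i = ch 0) := by
  constructor
  · intro h
    have key : ∀ k : Nat, (k : Int) < n → ch k = ch 0 := by
      intro k
      induction k with
      | zero => intro _; norm_num
      | succ m ih =>
        intro hk
        have hm : ((m : Int)) < n - 1 := by push_cast at hk ⊢; omega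
        have h1 := h m (by positivity) hm
        have : ((m + 1 : Nat) : Int) = (m : Int) + 1 := by push_cast; ring
        rw [this, ← h1]
        exact ih (by omega)
    intro i h0 hn
    have : i = ((i.toNat : Nat) : Int) := by omega
    rw [this]
    exact key i.toNat (by omega)
  · intro h i h0 h1
    rw [h i h0 (by omega), h (i + 1) (by omega) (by omega)]

lemma pv_innerA_eq (file_name : List String) (n : Int) (f0 : String) (j : Int) (c0 : Char)
    (hj : PySem.Str.pyGet? f0 j = some c0)
    (valid : ∀ i : Int, 0 ≤ i → i < n → (pvCharAt file_name i j).isSome) :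
    ∀ t : Nat, ∀ a : Int, 0 ≤ a → a ≤ n - 2 → (n - 1 - a).toNat = t →
    pvInnerA file_name n f0 j t a =
      (if ∀ i : Int, a ≤ i → i < n - 1 → pvCharAt file_name i j = pvCharAt file_name (i + 1) j
       then [c0] else ['?']) := by
  intro t
  induction t with
  | zero => intro a h0 h2 ht; omega
  | succ t ih =>
    intro a h0 h2 ht
    obtain ⟨c1, hc1⟩ := Option.isSome_iff_exists.1 (valid a h0 (by omega))
    obtain ⟨c2, hc2⟩ := Option.isSome_iff_exists.1 (valid (a + 1) (by omega) (by omega))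
    simp only [pvInnerA]
    by_cases hc : c1 = c2
    · by_cases ha : a = n - 2
      · have ht0 : t = 0 := by omega
        subst ht0
        have hnil : pvInnerA file_name n f0 j 0 (a + 1) = [] := rfl
        have hcond : ∀ i : Int, a ≤ i → i < n - 1 → pvCharAt file_name i j = pvCharAt file_name (i + 1) j := by
          intro i hi1 hi2
          have : i = a := by omega
          rw [this, hc1, hc2, hc]
        rw [if_pos hcond]
        subst ha
        have hj' : PySem.List.pyGet? f0.toList j = some c0 := by
          simpa [PySem.Str.pyGet?] using hj
        simp [hc1, hc2, hc, hnil, hj']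
      · have hstep := ih (a + 1) (by omega) (by omega) (by omega)
        have hiff : (∀ i : Int, a ≤ i → i < n - 1 → pvCharAt file_name i j = pvCharAt file_name (i + 1) j)
            ↔ (∀ i : Int, a + 1 ≤ i → i < n - 1 → pvCharAt file_name i j = pvCharAt file_name (i + 1) j) := by
          constructor
          · intro h i hi1 hi2; exact h i (by omega) hi2
          · intro h i hi1 hi2
            rcases eq_or_lt_of_le hi1 with he | hl
            · rw [← he, hc1, hc2, hc]
            · exact h i (by omega) hi2
        simp only [hc1, hc2, hc, if_neg ha]
        simp only [hstep, hiff]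
        simp
    · have hcond : ¬ ∀ i : Int, a ≤ i → i < n - 1 → pvCharAt file_name i j = pvCharAt file_name (i + 1) j := by
        intro h
        have := h a le_rfl (by omega)
        rw [hc1, hc2] at this
        exact hc (by simpa using this)
      rw [if_neg hcond]
      simp [hc1, hc2, hc]

-- Python s[j] for a valid nonnegative index, as a getElem
lemma pv_str_get (s : String) (j : Int) (h0 : 0 ≤ j) (h1 : j < (s.toList.length : Int)) :
    PySem.Str.pyGet? s j = some (s.toList[j.toNat]'(by omega)) := by
  simp only [PySem.Str.pyGet?, PySem.Chars.pyGet?]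
  exact PySem.List.pyGet?_eq_some_getElem _ h0 h1

-- per-column agreement of the two ports (num_of_file >= 2), given that every needed index is valid
lemma pv_col_eq (file_name : List String) (n : Int) (f0 : String) (j : Int) (c0 : Char)
    (hn : 2 ≤ n)
    (hj : PySem.Str.pyGet? f0 j = some c0)
    (valid : ∀ i : Int, 0 ≤ i → i < n → (pvCharAt file_name i j).isSome) :
    pvInnerA file_name n f0 j (n - 1).toNat 0 = [pvColB file_name n f0 j] := by
  have hA := pv_innerA_eq file_name n f0 j c0 hj valid (n - 1).toNat 0 le_rfl (by omega) (by omega)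
  have hcons : PySem.List.pyRange 0 n = 0 :: PySem.List.pyRange 1 n := by
    simpa using PySem.List.pyRange_one_cons (by omega : (0:Int) < n)
  have hQ : pvColB file_name n f0 j =
      (if ∀ i : Int, 0 ≤ i → i < n - 1 → pvCharAt file_name i j = pvCharAt file_name (i + 1) j
       then c0 else '?') := by
    have hiff : (PySem.Set.ofList ((PySem.List.pyRange 0 n).map (fun i => pvCharAt file_name i j))).len = 1
        ↔ (∀ i : Int, 0 ≤ i → i < n - 1 → pvCharAt file_name i j = pvCharAt file_name (i + 1) j) := by
      rw [hcons, List.map_cons, pv_set_len_one, pv_chain (fun i => pvCharAt file_name i j) n]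
      constructor
      · intro h i hi0 hin
        rcases eq_or_lt_of_le hi0 with he | hl
        · rw [← he]
        · exact h _ (List.mem_map_of_mem (by rw [PySem.List.mem_pyRange_one]; omega))
      · intro h y hy
        obtain ⟨i, hi, rfl⟩ := List.mem_map.1 hy
        rw [PySem.List.mem_pyRange_one] at hi
        exact h i (by omega) (by omega)
    simp only [pvColB]
    rw [hj]
    simp only [Option.getD_some]
    exact if_congr hiff rfl rfl
  rw [hA, hQ]
  by_cases hP : ∀ i : Int, 0 ≤ i → i < n - 1 → pvCharAt file_name i j = pvCharAt file_name (i + 1) j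
  · rw [if_pos hP, if_pos hP]
  · rw [if_neg hP, if_neg hP]



-- with an empty first name both ports return "" for every num_of_file (the column loop is empty)
lemma pv_empty (nf : Int) (rest : List String) :
    solution nf ("" :: rest) = solution_alt nf ("" :: rest) := by
  have hrange : PySem.List.pyRange 0 (PySem.Str.len "") = [] :=
    PySem.List.pyRange_one_eq_nil (by decide)
  simp only [solution, solution_alt, hrange, List.foldl_nil, List.map_nil]
  split <;> rfl

-- ===== VERDICT (by name: the statement is the Claim_ definition above) =====
theorem solution_spec : Claim_equal_solution := by
  intro nf fn _hDom hPre
  obtain ⟨hne, hcase⟩ := hPre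
  unfold Spec_solution
  cases fn with
  | nil => exact absurd rfl hne
  | cons f0 rest =>
    rcases hcase with hempty | ⟨hn1, hn2, hn3⟩
    · -- first name empty: both ports return ""
      have hf0 : f0 = "" := by simpa using hempty
      subst hf0
      exact pv_empty nf rest
    · have hlen0 : PySem.Str.len f0 = (f0.toList.length : Int) := by simp [PySem.Str.len]
      have hchar0 : ∀ j : Int, pvCharAt (f0 :: rest) 0 j = PySem.Str.pyGet? f0 j := by
        intro j; simp [pvCharAt]
      by_cases hone : nf = 1
      · subst hone
        simp only [solution, solution_alt]
        have hr : PySem.List.pyRange 0 (1 : Int) = [0] := by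
          simpa using PySem.List.pyRange_one_singleton (0 : Int)
        have hcol : ∀ j ∈ PySem.List.pyRange 0 (PySem.Str.len f0),
            pvColB (f0 :: rest) 1 f0 j = PySem.List.pyGetD f0.toList j '?' := by
          intro j _hj
          simp [pvColB, hr, hchar0, PySem.Set.ofList, PySem.Set.add, PySem.Set.empty,
            PySem.Set.len, PySem.Str.pyGet?, PySem.List.pyGetD]
        rw [List.map_congr_left hcol, hlen0, PySem.List.map_pyGetD_pyRange_zero' f0.toList '?',
          String.ofList_toList]
        simp
      · simp only [solution, solution_alt, if_neg hone]
        have hn2' : (2 : Int) ≤ nf := by omega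
        have hbody : ∀ (ans : List Char), ∀ j ∈ PySem.List.pyRange 0 (PySem.Str.len f0),
            ans ++ pvInnerA (f0 :: rest) nf f0 j (nf - 1).toNat 0
              = ans ++ [pvColB (f0 :: rest) nf f0 j] := by
          intro ans j hjmem
          rw [PySem.List.mem_pyRange_one] at hjmem
          rw [hlen0] at hjmem
          obtain ⟨hj0, hjL⟩ := hjmem
          have hj : PySem.Str.pyGet? f0 j = some (f0.toList[j.toNat]'(by omega)) :=
            pv_str_get f0 j hj0 hjL
          have hvalid : ∀ i : Int, 0 ≤ i → i < nf → (pvCharAt (f0 :: rest) i j).isSome := by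
            intro i hi0 hin
            have hilen : i < ((f0 :: rest).length : Int) := lt_of_lt_of_le hin hn2
            have hs : PySem.List.pyGet? (f0 :: rest) i
                = some ((f0 :: rest)[i.toNat]'(by omega)) :=
              PySem.List.pyGet?_eq_some_getElem _ hi0 hilen
            have hmem : (f0 :: rest)[i.toNat]'(by omega) ∈ (f0 :: rest).take nf.toNat := by
              apply List.mem_of_getElem? (i := i.toNat)
              rw [List.getElem?_take_of_lt (by omega)]
              simp
            have hslen := hn3 _ hmem
            simp only [List.headD_cons] at hslen
            simp only [pvCharAt, hs]
            rw [pv_str_get _ j hj0 (by exact_mod_cast lt_of_lt_of_le hjL (by exact_mod_cast hslen))]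
            simp
          rw [pv_col_eq (f0 :: rest) nf f0 j _ hn2' hj hvalid]
        rw [PySem.List.foldl_congr_mem _ _ _ [] hbody,
          PySem.List.foldl_append_singleton_eq_map (pvColB (f0 :: rest) nf f0) _ []]
        simp
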